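-- pv_equiv track=rewrite | github.com/Xuniverzadmin/agenticverz_2.0 | backend/app/skills/json_transform_v2.py | _op_omit
-- ===== SOURCE A (Python) =====
-- from typing import Any, Dict, List, Optional, Union
--
-- def _op_omit(data: Any, params: Dict[str, Any]) -> tuple[Any, Optional[str]]:
--     """Omit specific keys from object."""
--     if not isinstance(data, dict):
--         return None, "omit operation requires object input"
--
--     keys = set(params.get("keys", []))
--     if not keys:
--         return None, "Missing 'keys' parameter for omit operation"
--
--     result = {k: v for k, v in data.items() if k not in keys}
--     return result, None
-- ===== SOURCE B (Python) =====
-- def _op_omit(data, params):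
--     """Omit specific keys from object."""
--     if not isinstance(data, dict):
--         return None, "omit operation requires object input"
--
--     keys = params.get("keys", [])
--     if not keys:
--         return None, "Missing 'keys' parameter for omit operation"
--
--     result = dict(data)
--     for k in keys:
--         result.pop(k, None)
--     return result, None
-- ===== Notes on version B (the rewrite author's own statement) =====
-- stated objective: alternative
-- what changed: Instead of building a set of the omit keys and scanning every item of data with a membership test, B makes a shallow copy of data and iterates over the omit-keys list, popping each key from the copy (removal-by-key recursion in the port, not a filter).
import Mathlib
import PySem

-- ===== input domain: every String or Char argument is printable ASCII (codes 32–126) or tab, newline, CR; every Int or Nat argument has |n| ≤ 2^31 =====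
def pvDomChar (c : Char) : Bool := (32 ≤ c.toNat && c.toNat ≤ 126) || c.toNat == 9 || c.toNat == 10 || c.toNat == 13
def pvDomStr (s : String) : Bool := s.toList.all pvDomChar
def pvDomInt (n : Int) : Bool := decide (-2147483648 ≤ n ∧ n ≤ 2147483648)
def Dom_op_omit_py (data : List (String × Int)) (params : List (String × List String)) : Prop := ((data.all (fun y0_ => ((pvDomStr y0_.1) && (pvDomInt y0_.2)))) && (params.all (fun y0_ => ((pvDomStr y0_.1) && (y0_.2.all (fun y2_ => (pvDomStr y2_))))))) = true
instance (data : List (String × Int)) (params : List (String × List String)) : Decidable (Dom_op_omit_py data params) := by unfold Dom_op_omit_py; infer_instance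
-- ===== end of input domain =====

-- ===== PORT A =====
-- B pops each omit key from a shallow copy instead of scanning data with a set-membership filter (alternative decomposition, same result). Neither version mutates its arguments.
def op_omit_py (data : List (String × Int)) (params : List (String × List String)) : (Option (List (String × Int))) × Option String :=
  -- keys = set(params.get("keys", []))
  let keys : PySem.Set String := PySem.Set.ofList ((params.lookup "keys").getD [])
  -- if not keys: return None, "Missing 'keys' parameter for omit operation"
  if keys = [] then (none, some "Missing 'keys' parameter for omit operation")
  else
    -- result = {k: v for k, v in data.items() if k not in keys}
    (some (data.filter (fun p => !(PySem.Set.contains keys p.1))), none)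

-- ===== PORT B =====
-- result.pop(k, None): a dict holds at most one entry per key, so popping k deletes the (unique) entry keyed k.
-- On the association list this is "remove the first pair keyed k"; exact because Pre_ requires unique keys.
def pvEraseFirst (d : List (String × Int)) (k : String) : List (String × Int) :=
  match d with
  | [] => []
  | p :: rest => if p.1 = k then rest else p :: pvEraseFirst rest k

-- for k in keys: result.pop(k, None)
def pvPopAll (ks : List String) (d : List (String × Int)) : List (String × Int) :=
  match ks with
  | [] => d
  | k :: rest => pvPopAll rest (pvEraseFirst d k)

def op_omit_py_alt (data : List (String × Int)) (params : List (String × List String)) : (Option (List (String × Int))) × Option String :=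
  -- keys = params.get("keys", [])
  let ks : List String := (params.lookup "keys").getD []
  -- if not keys: …
  if ks = [] then (none, some "Missing 'keys' parameter for omit operation")
  else
    -- result = dict(data); for k in keys: result.pop(k, None); return result, None
    (some (pvPopAll ks data), none)

-- ===== PRECONDITION & SPEC =====
-- Pre_ excludes association lists whose keys repeat: a Python dict cannot hold duplicate keys, so such
-- lists are outside the dict convention and A's remove-all filter vs B's remove-one pop are both accidental there.
def Pre_op_omit_py (data : List (String × Int)) (params : List (String × List String)) : Prop :=
  (data.map Prod.fst).Nodup
instance (data : List (String × Int)) (params : List (String × List String)) : Decidable (Pre_op_omit_py data params) := by unfold Pre_op_omit_py; infer_instance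
def pvWitness_op_omit_py : (List (String × Int)) × (List (String × List String)) :=
  ([("a", 1), ("b", 2)], [("keys", ["a"])])
def Spec_op_omit_py (data : List (String × Int)) (params : List (String × List String)) (out : (Option (List (String × Int))) × Option String) : Prop := out = op_omit_py_alt data params
instance (data : List (String × Int)) (params : List (String × List String)) (out : (Option (List (String × Int))) × Option String) : Decidable (Spec_op_omit_py data params out) := by unfold Spec_op_omit_py; infer_instance

-- ===== CLAIM (what is proved, stated in full; the proofs are below) =====
def Claim_equal_op_omit_py : Prop := ∀ (data : List (String × Int)) (params : List (String × List String)), Dom_op_omit_py data params → Pre_op_omit_py data params → Spec_op_omit_py data params (op_omit_py data params)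

-- ===== LEMMAS AND PROOFS =====

-- On a list whose keys are unique, removing the first pair keyed k removes every pair keyed k.
theorem eraseFirst_eq_filter (d : List (String × Int)) (k : String)
    (h : (d.map Prod.fst).Nodup) :
    pvEraseFirst d k = d.filter (fun p => p.1 ≠ k) := by
  induction d with
  | nil => rfl
  | cons p rest ih =>
      simp only [List.map_cons, List.nodup_cons] at h
      by_cases hk : p.1 = k
      · rw [pvEraseFirst, if_pos hk, List.filter_cons_of_neg (by simp [hk])]
        symm
        apply List.filter_eq_self.2
        intro q hq
        simp only [decide_eq_true_eq]
        intro e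
        apply h.1
        rw [hk, ← e]
        exact List.mem_map_of_mem hq
      · rw [pvEraseFirst, if_neg hk, List.filter_cons_of_pos (by simp [hk]), ih h.2]

theorem nodup_keys_filter (d : List (String × Int)) (f : String × Int → Bool)
    (h : (d.map Prod.fst).Nodup) : ((d.filter f).map Prod.fst).Nodup := by
  exact List.Nodup.sublist (List.Sublist.map Prod.fst List.filter_sublist) h

-- The pop loop equals one scan that drops every pair whose key occurs in ks.
theorem popAll_eq_filter (ks : List String) (d : List (String × Int))
    (h : (d.map Prod.fst).Nodup) :
    pvPopAll ks d = d.filter (fun p => !(decide (p.1 ∈ ks))) := by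
  induction ks generalizing d with
  | nil => simp [pvPopAll]
  | cons k rest ih =>
      rw [pvPopAll, eraseFirst_eq_filter d k h,
        ih _ (nodup_keys_filter d _ h), List.filter_filter]
      apply List.filter_congr
      intro p _
      simp [List.mem_cons, Bool.and_comm]

theorem ofList_eq_nil_iff (ks : List String) : PySem.Set.ofList ks = [] ↔ ks = [] := by
  constructor
  · intro h
    cases ks with
    | nil => rfl
    | cons k ks =>
        exfalso
        have : k ∈ PySem.Set.ofList (k :: ks) := by
          rw [PySem.Set.mem_ofList]; exact List.mem_cons_self ..
        simp [h] at this
  · intro h; subst h; rfl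

-- ===== VERDICT (by name: the statement is the Claim_ definition above) =====
theorem op_omit_py_spec : Claim_equal_op_omit_py := by
  intro data params _ hpre
  unfold Spec_op_omit_py op_omit_py op_omit_py_alt
  simp only [ofList_eq_nil_iff]
  split
  · rfl
  · rw [popAll_eq_filter _ _ hpre]
    simp only [Prod.mk.injEq, Option.some.injEq, and_true]
    apply List.filter_congr
    intro p _
    simp [PySem.Set.mem_ofList]
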